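-- pv_equiv track=rewrite | github.com/Stanwang218/BUCT_compiler_code | ll1.py | eliminate_left_factor
-- ===== SOURCE A (Python) =====
-- def eliminate_left_factor(expr_dicts, nonterminal):
--     temp_dicts = {}
--     for key in expr_dicts:
--         l = r = 0
--         flag = True
--         while flag:
--             if len(expr_dicts[key]) == 1:
--                 break
--             for expression in expr_dicts[key]:
--                 if r >= len(expression) or expression[r] != expr_dicts[key][0][r]:
--                     flag = False
--                     break
--             if flag:
--                 r += 1
--         prefix = expr_dicts[key][0][l:r]
--         if not prefix:
--             temp_dicts[key] = expr_dicts[key]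
--             continue
--         key_ = key + '\''
--         nonterminal.add(key_)
--         temp_dicts[key_] = []
--         temp_dicts[key] = []
--         prefix.append(key_)
--         temp_dicts[key].append(prefix)
--         for expression in expr_dicts[key]:
--             if not expression[r:]:
--                 temp = ['ε']
--             else:
--                 temp = expression[r:]
--             temp_dicts[key_].append(temp)
--
--     return temp_dicts, nonterminal
-- ===== SOURCE B (Python) =====
-- def _lcp(a, b):
--     if a and b and a[0] == b[0]:
--         return [a[0]] + _lcp(a[1:], b[1:])
--     return []
--
--
-- def eliminate_left_factor(expr_dicts, nonterminal):
--     out = {}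
--     for key, exprs in expr_dicts.items():
--         if len(exprs) == 1:
--             out[key] = exprs
--             continue
--         prefix = exprs[0]
--         for e in exprs[1:]:
--             prefix = _lcp(prefix, e)
--         if not prefix:
--             out[key] = exprs
--             continue
--         r = len(prefix)
--         new_key = key + "'"
--         nonterminal.add(new_key)
--         out[new_key] = [e[r:] if e[r:] else ['ε'] for e in exprs]
--         out[key] = [prefix + [new_key]]
--     return out, nonterminal
-- ===== Notes on version B (the rewrite author's own statement) =====
-- stated objective: simpler
-- what changed: Replaces A's flag-controlled while-loop that re-scans every expression column by column with a pairwise longest-common-prefix fold over the expressions, and builds each rewritten key's two dict entries with direct assignments (a list comprehension for the primed key) instead of A's empty-list inserts followed by incremental appends.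
-- outside the precondition, e.g. on eliminate_left_factor({'A': []}, set()): A does not finish within the time limit, B raises IndexError
import Mathlib
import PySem

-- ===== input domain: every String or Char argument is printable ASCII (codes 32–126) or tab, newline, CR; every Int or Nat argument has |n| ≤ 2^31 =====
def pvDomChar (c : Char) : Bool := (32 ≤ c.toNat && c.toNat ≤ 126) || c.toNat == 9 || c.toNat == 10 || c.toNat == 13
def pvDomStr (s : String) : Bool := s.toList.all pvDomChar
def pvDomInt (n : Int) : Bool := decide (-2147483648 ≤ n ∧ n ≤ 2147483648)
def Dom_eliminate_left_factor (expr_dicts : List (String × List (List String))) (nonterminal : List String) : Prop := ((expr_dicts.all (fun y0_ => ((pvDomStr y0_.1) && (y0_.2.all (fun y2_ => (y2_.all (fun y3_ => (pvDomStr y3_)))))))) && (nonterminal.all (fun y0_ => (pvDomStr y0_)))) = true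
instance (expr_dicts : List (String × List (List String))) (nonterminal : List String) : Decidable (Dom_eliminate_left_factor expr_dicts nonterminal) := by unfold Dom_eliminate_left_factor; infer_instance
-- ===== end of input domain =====

-- B replaces A's flag-controlled column-scanning while-loop by a pairwise longest-common-prefix
-- fold and writes each rewritten key's two entries with direct dict assignments instead of
-- incremental appends.  Both versions mutate the `nonterminal` set in place in Python; the
-- equivalence proved here is about the returned pair (which contains that set).

-- ===== PORT A =====
-- inner `for expression in expr_dicts[key]` of the while loop: flag stays True at column r
-- iff every expression is long enough and agrees with expr_dicts[key][0] at r
def pvA_allMatch (exprs : List (List String)) (e0 : List String) (r : Nat) : Bool :=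
  exprs.all (fun e => decide (r < e.length) && (e.getD r "" == e0.getD r ""))

-- the `while flag` loop of A; fuel-bounded recursion (the loop stops as soon as r reaches
-- len(exprs[0]), so fuel e0.length+1 is enough whenever exprs ≠ []; on exprs = [] Python diverges
-- and the input is excluded by Pre_)
def pvA_while (exprs : List (List String)) (e0 : List String) : Nat → Nat → Nat
  | r, 0 => r
  | r, fuel + 1 =>
    if exprs.length == 1 then r
    else if pvA_allMatch exprs e0 r then pvA_while exprs e0 (r + 1) fuel
    else r

def eliminate_left_factor (expr_dicts : List (String × List (List String))) (nonterminal : List String) : (List (String × List (List String))) × List String :=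
  let st := expr_dicts.foldl
    (fun (st : PySem.Dict String (List (List String)) × List String) kv =>
      let key := kv.1
      let exprs := PySem.Dict.getD (PySem.Dict.mk expr_dicts) key []   -- expr_dicts[key]
      let e0 := exprs.headD []            -- expr_dicts[key][0] (exprs ≠ [] under Pre_)
      let r := pvA_while exprs e0 0 (e0.length + 1)
      let pfx := e0.take r                -- expr_dicts[key][0][l:r] with l = 0  (= PySem slice [0:r])
      if pfx.isEmpty then (st.1.insert key exprs, st.2)
      else
        let key' := key ++ "'"
        let nont := PySem.Set.add st.2 key'
        let temp := (st.1.insert key' []).insert key []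
        let pfx2 := pfx ++ [key']         -- prefix.append(key_)
        let temp := temp.modify key [] (fun v => v ++ [pfx2])   -- temp_dicts[key].append(prefix)
        let temp := exprs.foldl
          (fun t e =>
            let suffix := e.drop r        -- expression[r:]  (= PySem slice [r:])
            t.modify key' [] (fun v => v ++ [if suffix.isEmpty then ["ε"] else suffix]))
          temp
        (temp, nont))
    (PySem.Dict.empty, nonterminal)
  (st.1.items, st.2)

-- ===== PORT B =====
-- _lcp of Source B: longest common prefix of two expressions
def pvB_lcp : List String → List String → List String
  | a :: as_, b :: bs => if a == b then a :: pvB_lcp as_ bs else []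
  | _, _ => []

def eliminate_left_factor_alt (expr_dicts : List (String × List (List String))) (nonterminal : List String) : (List (String × List (List String))) × List String :=
  let st := expr_dicts.foldl
    (fun (st : PySem.Dict String (List (List String)) × List String) kv =>
      let key := kv.1
      let exprs := kv.2                   -- for key, exprs in expr_dicts.items()
      if exprs.length == 1 then (st.1.insert key exprs, st.2)
      else
        let pfx := (exprs.drop 1).foldl pvB_lcp (exprs.headD [])
        if pfx.isEmpty then (st.1.insert key exprs, st.2)
        else
          let r := pfx.length
          let key' := key ++ "'"
          let nont := PySem.Set.add st.2 key'
          let d := st.1.insert key' (exprs.map (fun e =>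
            let s := e.drop r
            if s.isEmpty then ["ε"] else s))
          let d := d.insert key [pfx ++ [key']]
          (d, nont))
    (PySem.Dict.empty, nonterminal)
  (st.1.items, st.2)

-- ===== PRECONDITION & SPEC =====
-- Pre_ excludes association lists with duplicate keys (they have no Python-dict counterpart, so
-- the ports cannot be compared there) and entries whose expression list is empty (A loops forever
-- on them; B raises IndexError).
def Pre_eliminate_left_factor (expr_dicts : List (String × List (List String))) (nonterminal : List String) : Prop :=
  (expr_dicts.map Prod.fst).Nodup ∧ ∀ kv ∈ expr_dicts, kv.2 ≠ []

instance (expr_dicts : List (String × List (List String))) (nonterminal : List String) : Decidable (Pre_eliminate_left_factor expr_dicts nonterminal) := by unfold Pre_eliminate_left_factor; infer_instance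

def pvWitness_eliminate_left_factor : (List (String × List (List String))) × List String :=
  ([("S", [["a", "b"], ["a", "c"]])], ["S"])

def Spec_eliminate_left_factor (expr_dicts : List (String × List (List String))) (nonterminal : List String) (out : (List (String × List (List String))) × List String) : Prop := out = eliminate_left_factor_alt expr_dicts nonterminal
instance (expr_dicts : List (String × List (List String))) (nonterminal : List String) (out : (List (String × List (List String))) × List String) : Decidable (Spec_eliminate_left_factor expr_dicts nonterminal out) := by unfold Spec_eliminate_left_factor; infer_instance

-- ===== CLAIM (what is proved, stated in full; the proofs are below) =====
def Claim_equal_eliminate_left_factor : Prop := ∀ (expr_dicts : List (String × List (List String))) (nonterminal : List String), Dom_eliminate_left_factor expr_dicts nonterminal → Pre_eliminate_left_factor expr_dicts nonterminal → Spec_eliminate_left_factor expr_dicts nonterminal (eliminate_left_factor expr_dicts nonterminal)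

-- ===== LEMMAS AND PROOFS =====

-- pvB_lcp a b is a prefix of a
theorem pvB_lcp_prefix : ∀ (a b : List String), pvB_lcp a b <+: a := by
  intro a
  induction a with
  | nil => intro b; cases b <;> exact List.nil_prefix
  | cons x xs ih =>
    intro b
    cases b with
    | nil => exact List.nil_prefix
    | cons y ys =>
      rw [pvB_lcp]
      split
      · exact List.cons_prefix_cons.mpr ⟨rfl, ih ys⟩
      · exact List.nil_prefix

-- pvB_lcp a b is a prefix of b as well
theorem pvB_lcp_prefix_right : ∀ (a b : List String), pvB_lcp a b <+: b := by
  intro a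
  induction a with
  | nil => intro b; cases b <;> exact List.nil_prefix
  | cons x xs ih =>
    intro b
    cases b with
    | nil => exact List.nil_prefix
    | cons y ys =>
      rw [pvB_lcp]
      split
      · rename_i h
        exact List.cons_prefix_cons.mpr ⟨(beq_iff_eq.mp h), ih ys⟩
      · exact List.nil_prefix

-- a proper index into a prefix reads the same element
theorem prefix_getD {L a : List String} (h : L <+: a) {k : Nat} (hk : k < L.length) :
    L.getD k "" = a.getD k "" := by
  obtain ⟨t, rfl⟩ := h
  simp [List.getD, List.getElem?_append_left hk]

-- pvB_lcp is maximal: right after it the two lists disagree (or one has ended)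
theorem pvB_lcp_max : ∀ (a b : List String),
    (pvB_lcp a b).length < a.length → (pvB_lcp a b).length < b.length →
    a.getD (pvB_lcp a b).length "" ≠ b.getD (pvB_lcp a b).length "" := by
  intro a
  induction a with
  | nil => intro b h1; simp at h1
  | cons x xs ih =>
    intro b
    cases b with
    | nil => intro _ h2; simp [pvB_lcp] at h2
    | cons y ys =>
      rw [pvB_lcp]
      split
      · rename_i h
        intro h1 h2
        simpa using ih ys (by simpa using h1) (by simpa using h2)
      · rename_i h
        intro _ _
        simpa using (fun e => h (beq_iff_eq.mpr e))

-- the fold of pvB_lcp is a prefix of its start …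
theorem pvB_fold_prefix (es : List (List String)) : ∀ a, es.foldl pvB_lcp a <+: a := by
  induction es with
  | nil => intro a; simp
  | cons e es ih =>
    intro a
    exact (ih (pvB_lcp a e)).trans (pvB_lcp_prefix a e)

-- … and of every list folded over
theorem pvB_fold_prefix_mem (es : List (List String)) : ∀ a e, e ∈ es → es.foldl pvB_lcp a <+: e := by
  induction es with
  | nil => intro a e h; simp at h
  | cons e1 es ih =>
    intro a e h
    rcases List.mem_cons.mp h with rfl | h
    · exact (pvB_fold_prefix es (pvB_lcp a e)).trans (pvB_lcp_prefix_right a e)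
    · exact ih (pvB_lcp a e1) e h

-- the folded lcp is maximal: not every list continues to agree right after it
theorem pvB_fold_max (es : List (List String)) : ∀ a : List String,
    (es.foldl pvB_lcp a).length < a.length →
    (∀ e ∈ es, (es.foldl pvB_lcp a).length < e.length ∧
        e.getD (es.foldl pvB_lcp a).length "" = a.getD (es.foldl pvB_lcp a).length "") → False := by
  induction es with
  | nil => intro a h1 _; simp at h1
  | cons e1 es ih =>
    intro a h1 h2
    simp only [List.foldl_cons] at h1 h2 ⊢
    set L := es.foldl pvB_lcp (pvB_lcp a e1) with hL
    have hpre : L <+: pvB_lcp a e1 := pvB_fold_prefix es (pvB_lcp a e1)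
    have hle : L.length ≤ (pvB_lcp a e1).length := hpre.length_le
    have he1 := h2 e1 (List.mem_cons_self)
    rcases Nat.lt_or_ge L.length (pvB_lcp a e1).length with hlt | hge
    · apply ih (pvB_lcp a e1) hlt
      intro e he
      have := h2 e (List.mem_cons_of_mem _ he)
      rw [prefix_getD (pvB_lcp_prefix a e1) hlt]
      exact this
    · have heq : L.length = (pvB_lcp a e1).length := le_antisymm hle hge
      apply pvB_lcp_max a e1 (heq ▸ h1) (heq ▸ he1.1)
      rw [← heq]
      exact he1.2.symm

-- A's column test succeeds strictly below the folded lcp's length …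
theorem allMatch_true (e0 : List String) (rest : List (List String)) (k : Nat)
    (hk : k < (rest.foldl pvB_lcp e0).length) : pvA_allMatch (e0 :: rest) e0 k = true := by
  have hpre := pvB_fold_prefix rest e0
  have hk0 : k < e0.length := lt_of_lt_of_le hk hpre.length_le
  simp only [pvA_allMatch, List.all_cons, List.all_eq_true, Bool.and_eq_true, decide_eq_true_eq,
    beq_iff_eq]
  refine ⟨⟨hk0, trivial⟩, fun e he => ?_⟩
  have hpe := pvB_fold_prefix_mem rest e0 e he
  refine ⟨lt_of_lt_of_le hk hpe.length_le, ?_⟩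
  rw [← prefix_getD hpe hk, prefix_getD hpre hk]

-- … and fails exactly at it
theorem allMatch_false (e0 : List String) (rest : List (List String)) :
    pvA_allMatch (e0 :: rest) e0 (rest.foldl pvB_lcp e0).length = false := by
  set m := (rest.foldl pvB_lcp e0).length with hm
  by_contra hcon
  have hall : pvA_allMatch (e0 :: rest) e0 m = true := by
    cases h : pvA_allMatch (e0 :: rest) e0 m
    · exact absurd h hcon
    · rfl
  simp only [pvA_allMatch, List.all_cons, List.all_eq_true, Bool.and_eq_true, decide_eq_true_eq,
    beq_iff_eq] at hall
  exact pvB_fold_max rest e0 hall.1.1 (fun e he => hall.2 e he)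

-- the while loop counts up to the first failing column
theorem pvA_while_eq (exprs : List (List String)) (e0 : List String) (m : Nat)
    (hne : exprs.length ≠ 1)
    (hbelow : ∀ k < m, pvA_allMatch exprs e0 k = true)
    (hm : pvA_allMatch exprs e0 m = false) :
    ∀ fuel r, r ≤ m → m - r < fuel → pvA_while exprs e0 r fuel = m := by
  intro fuel
  induction fuel with
  | zero => intro r _ h; omega
  | succ fuel ih =>
    intro r hr hf
    rw [pvA_while]
    rw [if_neg (by simpa using hne)]
    rcases Nat.lt_or_ge r m with hlt | hge
    · rw [hbelow r hlt, if_pos rfl]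
      exact ih (r + 1) hlt (by omega)
    · have : r = m := le_antisymm hr hge
      subst this
      rw [hm]
      simp

-- overwriting an already-present key commutes with inserting another key
theorem insert_insert_comm_of_contains {ν : Type} (d : PySem.Dict String ν) (k k' : String)
    (w x : ν) (h : d.contains k = true) (hne : k ≠ k') :
    (d.insert k' x).insert k w = (d.insert k w).insert k' x := by
  have hk2 : (d.insert k' x).contains k = true := by
    rw [PySem.Dict.contains_insert]; simp [h]
  apply PySem.Dict.ext
  cases hc' : d.contains k' with
  | true =>
    have hk3 : (d.insert k w).contains k' = true := by
      rw [PySem.Dict.contains_insert]; simp [hc']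
    rw [PySem.Dict.items_insert_of_contains _ w hk2,
        PySem.Dict.items_insert_of_contains _ x hc',
        PySem.Dict.items_insert_of_contains _ x hk3,
        PySem.Dict.items_insert_of_contains _ w h,
        List.map_map, List.map_map]
    apply List.map_congr_left
    intro p _
    simp only [Function.comp_apply]
    by_cases h1 : p.1 = k' <;> by_cases h2 : p.1 = k <;>
      simp [h1, h2, hne, Ne.symm hne, beq_iff_eq]
  | false =>
    have hk3 : (d.insert k w).contains k' = false := by
      rw [PySem.Dict.contains_insert]; simp [hc', Ne.symm hne]
    rw [PySem.Dict.items_insert_of_contains _ w hk2,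
        PySem.Dict.items_insert_of_not_contains _ x hc',
        PySem.Dict.items_insert_of_not_contains _ x hk3,
        PySem.Dict.items_insert_of_contains _ w h,
        List.map_append]
    simp [Ne.symm hne]

-- the append loop over temp_dicts[key'] collected as one insert
theorem foldl_modify_append {ν : Type} (g : List String → ν) (key key' : String)
    (hne : key ≠ key') (p : ν) :
    ∀ (l : List (List String)) (temp : PySem.Dict String (List ν)) (v0 : List ν),
      l.foldl (fun t e => t.modify key' [] (fun v => v ++ [g e]))
          ((temp.insert key' v0).insert key [p])
        = (temp.insert key' (v0 ++ l.map g)).insert key [p] := by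
  intro l
  induction l with
  | nil => intro temp v0; simp
  | cons e l ih =>
    intro temp v0
    rw [List.foldl_cons]
    have hstep : ((temp.insert key' v0).insert key [p]).modify key' []
        (fun v => v ++ [g e]) = (temp.insert key' (v0 ++ [g e])).insert key [p] := by
      show ((temp.insert key' v0).insert key [p]).insert key'
          ((((temp.insert key' v0).insert key [p]).getD key' []) ++ [g e]) = _
      rw [PySem.Dict.getD_insert_of_ne _ _ _ (Ne.symm hne), PySem.Dict.getD_insert_self]
      rw [insert_insert_comm_of_contains (temp.insert key' v0) key' key _ _
          (PySem.Dict.contains_insert_self temp key' v0) (Ne.symm hne),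
          PySem.Dict.insert_insert_self]
    rw [hstep, ih, List.append_assoc]
    rfl

-- a key differs from its primed copy
theorem key_ne_primed (key : String) : key ≠ key ++ "'" := by
  intro h
  have := congrArg String.length h
  simp [String.length_append] at this

-- one step of the two folds agrees on every admitted dictionary entry
theorem step_eq (key : String) (exprs : List (List String)) (hne : exprs ≠ [])
    (st : PySem.Dict String (List (List String)) × List String) :
    (let e0 := exprs.headD []
     let r := pvA_while exprs e0 0 (e0.length + 1)
     let pfx := e0.take r
     if pfx.isEmpty then (st.1.insert key exprs, st.2)
     else
       let key' := key ++ "'"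
       let nont := PySem.Set.add st.2 key'
       let temp := (st.1.insert key' []).insert key []
       let pfx2 := pfx ++ [key']
       let temp := temp.modify key [] (fun v => v ++ [pfx2])
       let temp := exprs.foldl
         (fun t e =>
           let suffix := e.drop r
           t.modify key' [] (fun v => v ++ [if suffix.isEmpty then ["ε"] else suffix]))
         temp
       (temp, nont))
    =
    (if exprs.length == 1 then (st.1.insert key exprs, st.2)
     else
       let pfx := (exprs.drop 1).foldl pvB_lcp (exprs.headD [])
       if pfx.isEmpty then (st.1.insert key exprs, st.2)
       else
         let r := pfx.length
         let key' := key ++ "'"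
         let nont := PySem.Set.add st.2 key'
         let d := st.1.insert key' (exprs.map (fun e =>
           let s := e.drop r
           if s.isEmpty then ["ε"] else s))
         let d := d.insert key [pfx ++ [key']]
         (d, nont)) := by
  cases exprs with
  | nil => exact absurd rfl hne
  | cons e0 rest =>
    cases rest with
    | nil =>
      simp [pvA_while]
    | cons e1 rest1 =>
      have hlen : ((e0 :: e1 :: rest1).length == 1) = false := by simp
      have hpre := pvB_fold_prefix (e1 :: rest1) e0
      have hmle : ((e1 :: rest1).foldl pvB_lcp e0).length ≤ e0.length := hpre.length_le
      have hwhile : pvA_while (e0 :: e1 :: rest1) e0 0 (e0.length + 1)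
          = ((e1 :: rest1).foldl pvB_lcp e0).length :=
        pvA_while_eq _ _ _ (by simp)
          (fun k hk => allMatch_true e0 (e1 :: rest1) k hk)
          (allMatch_false e0 (e1 :: rest1)) (e0.length + 1) 0 (Nat.zero_le _) (by omega)
      have htake : e0.take ((e1 :: rest1).foldl pvB_lcp e0).length = (e1 :: rest1).foldl pvB_lcp e0 :=
        (List.prefix_iff_eq_take.mp hpre).symm
      simp only [List.headD_cons, List.drop_one, List.tail_cons, hwhile, htake, hlen]
      rw [if_neg (Bool.false_ne_true)]
      set L := (e1 :: rest1).foldl pvB_lcp e0 with hL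
      by_cases hLe : L.isEmpty
      · rw [if_pos hLe, if_pos hLe]
      · rw [if_neg hLe, if_neg hLe]
        have hmod : (((st.1.insert (key ++ "'") []).insert key []).modify key []
            (fun v => v ++ [L ++ [key ++ "'"]]))
            = (st.1.insert (key ++ "'") []).insert key [L ++ [key ++ "'"]] := by
          show (((st.1.insert (key ++ "'") []).insert key []).insert key
              (((((st.1.insert (key ++ "'") []).insert key []).getD key [])) ++ [L ++ [key ++ "'"]])) = _
          rw [PySem.Dict.getD_insert_self, PySem.Dict.insert_insert_self]
          rfl
        rw [hmod]
        have hfold := foldl_modify_append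
          (fun e => if (e.drop L.length).isEmpty then ["ε"] else e.drop L.length)
          key (key ++ "'") (key_ne_primed key) (L ++ [key ++ "'"])
          (e0 :: e1 :: rest1) st.1 []
        rw [hfold]
        rfl

-- ===== VERDICT (by name: the statement is the Claim_ definition above) =====
theorem eliminate_left_factor_spec : Claim_equal_eliminate_left_factor := by
  intro ed nt _ hpre
  obtain ⟨hnd, hnonempty⟩ := hpre
  unfold Spec_eliminate_left_factor eliminate_left_factor eliminate_left_factor_alt
  dsimp only
  refine congrArg (fun st : PySem.Dict String (List (List String)) × List String => (st.1.items, st.2)) ?_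
  refine PySem.List.foldl_congr_mem _ _ _ _ ?_
  intro st kv hkv
  have hget : PySem.Dict.getD (PySem.Dict.mk ed) kv.1 [] = kv.2 := by
    refine PySem.Dict.getD_of_mem_items _ ?_ ?_ []
    · exact (Prod.mk.eta (p := kv)) ▸ hkv
    · exact hnd
  rw [hget]
  exact step_eq kv.1 kv.2 (hnonempty kv hkv) st
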